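-- pv_equiv track=rewrite | github.com/ntgiang71096/vfdetector | issue_visualizer.py | get_occ
-- ===== SOURCE A (Python) =====
-- def get_occ(vuln_terms, neg_test):
--     term_to_count = {}
--     list_msg_tokens = []
--     for msg in neg_test:
--         list_msg_tokens.append(msg.split(' '))
--
--     for term in vuln_terms:
--         count = 0
--         for tokens in list_msg_tokens:
--             if term in tokens:
--                 count += 1
--         term_to_count[term] = count
--
--     term_occ = [(term, count) for term, count in term_to_count.items()]
--     term_occ.sort(key=lambda x: x[1], reverse=True)
--
--     return term_occ
-- ===== SOURCE B (Python) =====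
-- def get_occ(vuln_terms, neg_test):
--     counts = {term: 0 for term in vuln_terms}
--     for msg in neg_test:
--         for token in set(msg.split(' ')):
--             if token in counts:
--                 counts[token] += 1
--     term_occ = list(counts.items())
--     term_occ.sort(key=lambda x: x[1], reverse=True)
--     return term_occ
-- ===== Notes on version B (the rewrite author's own statement) =====
-- stated objective: faster
-- what changed: Replaces A's per-term scan over all tokenized messages with a zero-initialized count table over vuln_terms and a single pass over neg_test that increments counts for each distinct token of a message, then sorts the items by count descending.
import Mathlib
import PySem

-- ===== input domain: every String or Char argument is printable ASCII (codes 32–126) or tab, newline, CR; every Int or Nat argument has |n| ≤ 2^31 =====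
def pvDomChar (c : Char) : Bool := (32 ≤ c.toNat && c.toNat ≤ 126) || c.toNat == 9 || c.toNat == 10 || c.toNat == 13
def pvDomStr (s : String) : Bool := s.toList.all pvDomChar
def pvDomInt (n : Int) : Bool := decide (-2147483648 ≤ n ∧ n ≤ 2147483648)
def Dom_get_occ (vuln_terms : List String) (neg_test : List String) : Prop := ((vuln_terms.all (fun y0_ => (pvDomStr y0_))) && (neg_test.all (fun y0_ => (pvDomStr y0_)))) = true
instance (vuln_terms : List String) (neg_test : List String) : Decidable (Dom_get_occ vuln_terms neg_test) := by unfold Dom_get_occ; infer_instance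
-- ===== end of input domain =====

-- B replaces A's per-term scan over all tokenized messages with one pass over the
-- messages accumulating into a zero-initialized count table (objective: faster).

-- shared tokenizer: msg.split(' ') — PySem.Chars.splitOn is exact for a non-empty separator
def pvToks (msg : String) : List String :=
  (PySem.Chars.splitOn msg.toList [' ']).map String.mk

-- ===== PORT A =====
def get_occ (vuln_terms : List String) (neg_test : List String) : List (String × Int) :=
  let list_msg_tokens : List (List String) := neg_test.map (fun msg => pvToks msg)
  let term_to_count : PySem.Dict String Int :=
    vuln_terms.foldl
      (fun d term =>
        d.insert term
          (list_msg_tokens.foldl (fun count tokens => if term ∈ tokens then count + 1 else count) 0))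
      PySem.Dict.empty
  let term_occ := term_to_count.items
  PySem.List.sorted term_occ (fun x => x.2) true

-- ===== PORT B =====
def get_occ_alt (vuln_terms : List String) (neg_test : List String) : List (String × Int) :=
  let counts0 : PySem.Dict String Int :=
    vuln_terms.foldl (fun d term => d.insert term 0) PySem.Dict.empty
  let counts : PySem.Dict String Int :=
    neg_test.foldl
      (fun d msg =>
        (PySem.Set.ofList (pvToks msg)).foldl
          (fun d token => if d.contains token then d.modify token 0 (· + 1) else d) d)
      counts0
  let term_occ := counts.items
  PySem.List.sorted term_occ (fun x => x.2) true

-- ===== PRECONDITION & SPEC =====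
def Spec_get_occ (vuln_terms : List String) (neg_test : List String) (out : List (String × Int)) : Prop := out = get_occ_alt vuln_terms neg_test
instance (vuln_terms : List String) (neg_test : List String) (out : List (String × Int)) : Decidable (Spec_get_occ vuln_terms neg_test out) := by unfold Spec_get_occ; infer_instance

-- ===== CLAIM (what is proved, stated in full; the proofs are below) =====
def Claim_equal_get_occ : Prop := ∀ (vuln_terms : List String) (neg_test : List String), Dom_get_occ vuln_terms neg_test → Spec_get_occ vuln_terms neg_test (get_occ vuln_terms neg_test)

-- ===== LEMMAS AND PROOFS =====

-- counting loop = countP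
theorem pv_count_foldl (t : String) (l : List (List String)) (c : Int) :
    l.foldl (fun count tokens => if t ∈ tokens then count + 1 else count) c
      = c + (l.countP (fun tokens => decide (t ∈ tokens)) : Int) := by
  induction l generalizing c with
  | nil => simp
  | cons x l ih =>
    simp only [List.foldl_cons, List.countP_cons, ih]
    by_cases h : t ∈ x <;> simp [h] <;> push_cast <;> ring

-- "normal form" dicts: items = ks.map (fun k => (k, g k))
theorem pv_contains_norm (ks : List String) (g : String → Int) (x : String) :
    (PySem.Dict.mk (ks.map fun k => (k, g k))).contains x = decide (x ∈ ks) := by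
  by_cases h : x ∈ ks
  · simp only [PySem.Dict.contains, List.any_map, Function.comp_def, h, decide_true]
    simp only [List.any_eq_true, beq_iff_eq]
    exact ⟨x, h, rfl⟩
  · simp only [PySem.Dict.contains, List.any_map, Function.comp_def, h, decide_false]
    simp [List.any_eq_false]
    intro a ha e
    exact h (e ▸ ha)

theorem pv_getD_norm (ks : List String) (g : String → Int) (x : String) (d0 : Int)
    (h : x ∈ ks) :
    (PySem.Dict.mk (ks.map fun k => (k, g k))).getD x d0 = g x := by
  revert h
  induction ks with
  | nil => intro h; cases h
  | cons a ks ih =>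
    intro h
    by_cases ha : a = x
    · subst ha
      simp [PySem.Dict.getD, PySem.Dict.get?]
    · have hx : x ∈ ks := by
        rcases List.mem_cons.mp h with h1 | h1
        · exact absurd h1.symm ha
        · exact h1
      simpa [PySem.Dict.getD, PySem.Dict.get?, ha] using ih hx

theorem pv_insert_norm (ks : List String) (g : String → Int) (x : String) (v : Int)
    (h : x ∈ ks) :
    (PySem.Dict.mk (ks.map fun k => (k, g k))).insert x v
      = PySem.Dict.mk (ks.map fun k => (k, if k = x then v else g k)) := by
  simp only [PySem.Dict.insert, pv_contains_norm, h, decide_true, if_true, List.map_map]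
  congr 1
  apply List.map_congr_left
  intro a _
  by_cases ha : a = x <;> simp [ha]

theorem pv_insert_norm_new (ks : List String) (g : String → Int) (x : String) (v : Int)
    (h : x ∉ ks) :
    (PySem.Dict.mk (ks.map fun k => (k, g k))).insert x v
      = PySem.Dict.mk ((ks.map fun k => (k, g k)) ++ [(x, v)]) := by
  simp [PySem.Dict.insert, pv_contains_norm, h]

-- A's dict-building loop (value depends only on the key)
theorem pv_foldl_insert_norm (l : List String) (f : String → Int) (ks : List String) :
    l.foldl (fun d term => d.insert term (f term))
        (PySem.Dict.mk (ks.map fun k => (k, f k)))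
      = PySem.Dict.mk ((PySem.Set.update ks l).map fun k => (k, f k)) := by
  induction l generalizing ks with
  | nil => simp [PySem.Set.update]
  | cons t l ih =>
    simp only [List.foldl_cons]
    by_cases h : t ∈ ks
    · have hc : ks.contains t = true := by simpa [List.contains_iff_mem] using h
      have : (PySem.Dict.mk (ks.map fun k => (k, f k))).insert t (f t)
          = PySem.Dict.mk (ks.map fun k => (k, f k)) := by
        rw [pv_insert_norm ks f t (f t) h]
        congr 1
        apply List.map_congr_left
        intro a _
        by_cases ha : a = t <;> simp [ha]
      rw [this, ih ks]
      simp [PySem.Set.update, PySem.Set.add, hc, h]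
    · have hc : ks.contains t = false := by simpa [List.contains_iff_mem] using h
      rw [pv_insert_norm_new ks f t (f t) h]
      have : (ks.map fun k => (k, f k)) ++ [(t, f t)] = (ks ++ [t]).map fun k => (k, f k) := by
        simp
      rw [this, ih (ks ++ [t])]
      simp [PySem.Set.update, PySem.Set.add, hc, h]

-- B's inner loop over the distinct tokens of one message
theorem pv_foldl_tok_norm (s : List String) (hs : s.Nodup) (ks : List String)
    (g : String → Int) :
    s.foldl (fun d token => if d.contains token then d.modify token 0 (· + 1) else d)
        (PySem.Dict.mk (ks.map fun k => (k, g k)))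
      = PySem.Dict.mk (ks.map fun k => (k, if k ∈ s then g k + 1 else g k)) := by
  induction s generalizing g with
  | nil => simp
  | cons tok s ih =>
    have htok : tok ∉ s := (List.nodup_cons.mp hs).1
    have hs' : s.Nodup := (List.nodup_cons.mp hs).2
    simp only [List.foldl_cons]
    by_cases h : tok ∈ ks
    · have hc : (PySem.Dict.mk (ks.map fun k => (k, g k))).contains tok = true := by
        simp [pv_contains_norm, h]
      rw [if_pos hc]
      have hmod : (PySem.Dict.mk (ks.map fun k => (k, g k))).modify tok 0 (· + 1)
          = PySem.Dict.mk (ks.map fun k => (k, if k = tok then g tok + 1 else g k)) := by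
        unfold PySem.Dict.modify
        rw [pv_getD_norm ks g tok 0 h, pv_insert_norm ks g tok (g tok + 1) h]
      rw [hmod, ih hs' (fun k => if k = tok then g tok + 1 else g k)]
      congr 1
      apply List.map_congr_left
      intro a _
      by_cases ha : a = tok
      · subst ha
        simp [htok]
      · simp [ha, List.mem_cons]
    · have hc : (PySem.Dict.mk (ks.map fun k => (k, g k))).contains tok = false := by
        rw [pv_contains_norm]; simp [h]
      rw [if_neg (by simp [hc])]
      rw [ih hs' g]
      congr 1
      apply List.map_congr_left
      intro a ha
      have hat : a ≠ tok := fun e => h (e ▸ ha)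
      simp [List.mem_cons, hat]

-- B's outer loop over the messages
theorem pv_foldl_msgs_norm (ms : List String) (ks : List String) (g : String → Int) :
    ms.foldl
        (fun d msg =>
          (PySem.Set.ofList (pvToks msg)).foldl
            (fun d token => if d.contains token then d.modify token 0 (· + 1) else d) d)
        (PySem.Dict.mk (ks.map fun k => (k, g k)))
      = PySem.Dict.mk (ks.map fun k =>
          (k, g k + (ms.countP (fun m => decide (k ∈ pvToks m)) : Int))) := by
  induction ms generalizing g with
  | nil => simp
  | cons m ms ih =>
    simp only [List.foldl_cons]
    rw [pv_foldl_tok_norm (PySem.Set.ofList (pvToks m)) (PySem.Set.nodup_ofList _) ks g]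
    have hmem : ∀ k, (k ∈ PySem.Set.ofList (pvToks m)) ↔ k ∈ pvToks m :=
      fun k => PySem.Set.mem_ofList _ _
    have : (ks.map fun k => (k, if k ∈ PySem.Set.ofList (pvToks m) then g k + 1 else g k))
        = ks.map fun k => (k, if k ∈ pvToks m then g k + 1 else g k) := by
      apply List.map_congr_left
      intro a _
      by_cases h : a ∈ pvToks m <;> simp [h, hmem]
    rw [this, ih (fun k => if k ∈ pvToks m then g k + 1 else g k)]
    congr 1
    apply List.map_congr_left
    intro a _
    simp only [List.countP_cons]
    by_cases h : a ∈ pvToks m <;> simp [h] <;> push_cast <;> ring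

-- both ports reduce to the same sorted list
theorem pv_get_occ_eq (vuln_terms neg_test : List String) :
    get_occ vuln_terms neg_test
      = PySem.List.sorted
          ((PySem.Set.ofList vuln_terms).map fun k =>
            (k, (neg_test.countP (fun m => decide (k ∈ pvToks m)) : Int)))
          (fun x => x.2) true := by
  have hA := pv_foldl_insert_norm vuln_terms
    (fun k => (neg_test.countP (fun m => decide (k ∈ pvToks m)) : Int)) []
  simp only [get_occ, pv_count_foldl, zero_add, List.countP_map, Function.comp_def]
  simp only [List.map_nil] at hA
  have hempty : (PySem.Dict.empty : PySem.Dict String Int) = PySem.Dict.mk [] := rfl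
  rw [hempty]
  simp only [hA]
  rfl

theorem pv_get_occ_alt_eq (vuln_terms neg_test : List String) :
    get_occ_alt vuln_terms neg_test
      = PySem.List.sorted
          ((PySem.Set.ofList vuln_terms).map fun k =>
            (k, (neg_test.countP (fun m => decide (k ∈ pvToks m)) : Int)))
          (fun x => x.2) true := by
  have hA := pv_foldl_insert_norm vuln_terms (fun _ => (0 : Int)) []
  simp only [List.map_nil] at hA
  have hB := pv_foldl_msgs_norm neg_test (PySem.Set.ofList vuln_terms) (fun _ => (0 : Int))
  simp only [get_occ_alt]
  have hempty : (PySem.Dict.empty : PySem.Dict String Int) = PySem.Dict.mk [] := rfl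
  rw [hempty]
  simp only [hA]
  have hupd : PySem.Set.update ([] : List String) vuln_terms = PySem.Set.ofList vuln_terms := rfl
  rw [hupd]
  simp only [hB, zero_add]

-- ===== VERDICT (by name: the statement is the Claim_ definition above) =====
theorem get_occ_spec : Claim_equal_get_occ := by
  intro vuln_terms neg_test _
  unfold Spec_get_occ
  rw [pv_get_occ_eq, pv_get_occ_alt_eq]
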